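-- pv_equiv track=rewrite | github.com/kaapana/kaapana | ci/ci-code/clean/create_ticket_if_ci_failed.py | filter_logs_by_keywords
-- ===== SOURCE A (Python) =====
-- from typing import Dict, List
--
-- def filter_logs_by_keywords(
--     logs: List[str], error_keywords: List[str], whitelist: List[str], context_lines: int
-- ) -> str:
--     """
--     Filters log entries by a list of error keywords.
--
--     Args:
--         logs (List[str]): The list of log entries to filter.
--         error_keywords (List[str]): The list of error keywords to match.
--         whitelist (List[str]): The list of whitelisted log entries to exclude from filtering.
--         context_lines (int): The number of surrounding lines to include with each matched log entry.
--
--     Returns: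
--         str: The filtered log entries, with surrounding context lines.
--     """
--     seen_lines = set()
--     filtered_logs = []
--     for i, line in enumerate(logs):
--         # Check if line contains error keywords but NOT whitelisted phrases
--         if any(keyword in line.lower() for keyword in error_keywords) and not any(
--             phrase in line for phrase in whitelist
--         ):
--             start = max(0, i - context_lines)
--             end = min(len(logs), i + context_lines + 1)
--
--             # Add only new lines (avoid duplicates)
--             for j in range(start, end):
--                 if j not in seen_lines:
--                     filtered_logs.append(logs[j])
--                     seen_lines.add(j)  # Mark this line as added
--
--     filtered_logs_str = "".join(filtered_logs)
--     return filtered_logs_str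
-- ===== SOURCE B (Python) =====
-- def filter_logs_by_keywords(logs, error_keywords, whitelist, context_lines):
--     n = len(logs)
--
--     def is_match(line):
--         low = line.lower()
--         return any(k in low for k in error_keywords) and not any(
--             p in line for p in whitelist
--         )
--
--     # Merge the context windows on the fly: `nxt` is the first index not yet
--     # emitted, so each window contributes a single contiguous slice and no
--     # seen-set is needed.
--     pieces = []
--     nxt = 0
--     for i, line in enumerate(logs):
--         if is_match(line):
--             lo = max(nxt, i - context_lines, 0)
--             hi = min(n, i + context_lines + 1)
--             if lo < hi:
--                 pieces.extend(logs[lo:hi])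
--                 nxt = hi
--     return "".join(pieces)
-- ===== Notes on version B (the rewrite author's own statement) =====
-- stated objective: alternative
-- what changed: A interleaves a per-index seen-set with one append per unseen context index; B keeps only a next-unemitted-index watermark, merges each match's context window into a single contiguous slice logs[lo:hi] and extends the output with it, so the seen-set and the per-index membership tests disappear.
import Mathlib
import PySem

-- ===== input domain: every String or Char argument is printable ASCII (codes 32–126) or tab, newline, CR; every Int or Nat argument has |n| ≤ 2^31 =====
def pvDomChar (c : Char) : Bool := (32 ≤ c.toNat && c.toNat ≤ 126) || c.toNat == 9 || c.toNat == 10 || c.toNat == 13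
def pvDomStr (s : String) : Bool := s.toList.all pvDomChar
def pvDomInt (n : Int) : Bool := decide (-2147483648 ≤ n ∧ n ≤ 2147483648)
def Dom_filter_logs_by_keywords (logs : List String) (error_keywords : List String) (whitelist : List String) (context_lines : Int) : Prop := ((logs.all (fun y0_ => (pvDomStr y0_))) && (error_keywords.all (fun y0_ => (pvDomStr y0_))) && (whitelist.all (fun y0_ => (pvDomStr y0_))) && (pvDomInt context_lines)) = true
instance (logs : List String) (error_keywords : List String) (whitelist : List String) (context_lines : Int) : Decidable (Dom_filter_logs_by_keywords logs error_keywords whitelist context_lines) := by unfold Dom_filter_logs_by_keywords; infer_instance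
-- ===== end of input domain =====

-- B replaces A's seen-set bookkeeping by a next-unemitted-index watermark that merges each
-- context window into one contiguous slice (alternative decomposition, same asymptotic cost).

-- ===== PORT A =====
-- the 'for i, line in enumerate(logs)' loop; state = (seen_lines, filtered_logs).
-- logs[j] is always in range here (0 ≤ j < len(logs)), so pyGetD logs j "" is exact.
def filterLoopA (logs : List String) (error_keywords : List String) (whitelist : List String)
    (context_lines : Int) : List (Int × String) → PySem.Set Int × List String → PySem.Set Int × List String
  | [], st => st
  | (i, line) :: rest, st =>
      let st' :=
        if (error_keywords.any fun keyword => PySem.Str.isIn keyword (PySem.Str.lower line)) &&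
           !(whitelist.any fun phrase => PySem.Str.isIn phrase line) then
          let start := max 0 (i - context_lines)
          let stop := min ((logs.length : Int)) (i + context_lines + 1)
          (PySem.List.pyRange start stop 1).foldl
            (fun st2 j =>
              if !(PySem.Set.contains st2.1 j) then
                (PySem.Set.add st2.1 j, st2.2 ++ [PySem.List.pyGetD logs j ""])
              else st2)
            st
        else st
      filterLoopA logs error_keywords whitelist context_lines rest st'

def filter_logs_by_keywords (logs : List String) (error_keywords : List String) (whitelist : List String) (context_lines : Int) : String :=
  let st := filterLoopA logs error_keywords whitelist context_lines
      (PySem.List.enumerate logs 0) (PySem.Set.empty, [])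
  PySem.Str.join "" st.2

-- ===== PORT B =====
-- B's is_match helper
def bIsMatch (error_keywords : List String) (whitelist : List String) (line : String) : Bool :=
  let low := PySem.Str.lower line
  (error_keywords.any fun k => PySem.Str.isIn k low) &&
    !(whitelist.any fun p => PySem.Str.isIn p line)

-- B's loop; state = (nxt, pieces)
def filterLoopB (logs : List String) (error_keywords : List String) (whitelist : List String)
    (context_lines : Int) : List (Int × String) → Int × List String → Int × List String
  | [], st => st
  | (i, line) :: rest, (nxt, pieces) =>
      if bIsMatch error_keywords whitelist line then
        let lo := max (max nxt (i - context_lines)) 0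
        let hi := min ((logs.length : Int)) (i + context_lines + 1)
        if lo < hi then
          filterLoopB logs error_keywords whitelist context_lines rest
            (hi, pieces ++ PySem.List.slice logs (some lo) (some hi))
        else
          filterLoopB logs error_keywords whitelist context_lines rest (nxt, pieces)
      else filterLoopB logs error_keywords whitelist context_lines rest (nxt, pieces)

def filter_logs_by_keywords_alt (logs : List String) (error_keywords : List String) (whitelist : List String) (context_lines : Int) : String :=
  let st := filterLoopB logs error_keywords whitelist context_lines
      (PySem.List.enumerate logs 0) (0, [])
  PySem.Str.join "" st.2

-- ===== PRECONDITION & SPEC =====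
def Spec_filter_logs_by_keywords (logs : List String) (error_keywords : List String) (whitelist : List String) (context_lines : Int) (out : String) : Prop := out = filter_logs_by_keywords_alt logs error_keywords whitelist context_lines
instance (logs : List String) (error_keywords : List String) (whitelist : List String) (context_lines : Int) (out : String) : Decidable (Spec_filter_logs_by_keywords logs error_keywords whitelist context_lines out) := by unfold Spec_filter_logs_by_keywords; infer_instance

-- ===== CLAIM (what is proved, stated in full; the proofs are below) =====
def Claim_equal_filter_logs_by_keywords : Prop := ∀ (logs : List String) (error_keywords : List String) (whitelist : List String) (context_lines : Int), Dom_filter_logs_by_keywords logs error_keywords whitelist context_lines → Spec_filter_logs_by_keywords logs error_keywords whitelist context_lines (filter_logs_by_keywords logs error_keywords whitelist context_lines)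

-- ===== LEMMAS AND PROOFS =====

-- B's loop only appends to its pieces accumulator.
theorem filterLoopB_shift (logs error_keywords whitelist : List String) (context_lines : Int)
    (l : List (Int × String)) (nxt : Int) (pieces : List String) :
    (filterLoopB logs error_keywords whitelist context_lines l (nxt, pieces)).2
      = pieces ++ (filterLoopB logs error_keywords whitelist context_lines l (nxt, [])).2 := by
  induction l generalizing nxt pieces with
  | nil => simp [filterLoopB]
  | cons p rest ih =>
      obtain ⟨i, line⟩ := p
      simp only [filterLoopB]
      split_ifs with h1 h2
      · simp only [List.nil_append]
        conv_rhs => rw [ih]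
        rw [ih]
        simp
      · exact ih _ _
      · exact ih _ _

-- map of pyGetD over an in-bounds range is the slice
theorem map_pyGetD_eq_slice (logs : List String) (lo stop : Int)
    (h0 : 0 ≤ lo) (h1 : lo < stop) (h2 : stop ≤ (logs.length : Int)) :
    (PySem.List.pyRange lo stop 1).map (fun j => PySem.List.pyGetD logs j "")
      = PySem.List.slice logs (some lo) (some stop) := by
  have hlen : stop ≤ PySem.List.len logs := by simpa [PySem.List.len_eq] using h2
  have hsplit := PySem.List.pyRange_one_append lo stop ((logs.length : Int)) (le_of_lt h1) h2
  have hmap := PySem.List.map_pyGetD_pyRange' (xs := logs) (a := lo) (d := "") h0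
  rw [hsplit, List.map_append] at hmap
  have htake := congrArg (fun l => List.take (stop - lo).toNat l) hmap
  simp only at htake
  rw [List.take_append_of_le_length (by
        simp [PySem.List.length_pyRange_one])] at htake
  rw [List.take_of_length_le (by simp [PySem.List.length_pyRange_one])] at htake
  rw [htake, PySem.List.slice_toNat logs h0 (by omega)]
  congr 1
  omega

-- A's inner 'for j in range(start, stop)' loop: it appends exactly the not-yet-seen
-- suffix [max start nxt, stop) of the window, and marks exactly those indices seen.
theorem innerLoopA (logs : List String) (stop : Int) :
    ∀ (fuel : Nat) (a nxt : Int) (seen : PySem.Set Int) (out : List String),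
      fuel = (stop - a).toNat →
      (∀ j ∈ seen, j < nxt) →
      (∀ j : Int, a ≤ j → j < nxt → j ∈ seen) →
      (((PySem.List.pyRange a stop 1).foldl
          (fun st2 j =>
            if !(PySem.Set.contains st2.1 j) then
              (PySem.Set.add st2.1 j, st2.2 ++ [PySem.List.pyGetD logs j ""])
            else st2)
          (seen, out)).2
         = out ++ (PySem.List.pyRange (max a nxt) stop 1).map (fun j => PySem.List.pyGetD logs j ""))
      ∧ (∀ j : Int, j ∈ ((PySem.List.pyRange a stop 1).foldl
          (fun st2 j =>
            if !(PySem.Set.contains st2.1 j) then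
              (PySem.Set.add st2.1 j, st2.2 ++ [PySem.List.pyGetD logs j ""])
            else st2)
          (seen, out)).1 ↔ (j ∈ seen ∨ (max a nxt ≤ j ∧ j < stop))) := by
  intro fuel
  induction fuel with
  | zero =>
      intro a nxt seen out hfuel h1 h2
      have hstop : stop ≤ a := by omega
      rw [PySem.List.pyRange_one_eq_nil hstop,
          PySem.List.pyRange_one_eq_nil (le_trans hstop (le_max_left a nxt))]
      constructor
      · simp
      · intro j; simp only [List.foldl_nil]
        constructor
        · exact fun h => Or.inl h
        · rintro (h | ⟨hl, hr⟩)
          · exact h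
          · exfalso; have := le_max_left a nxt; omega
  | succ fuel ih =>
      intro a nxt seen out hfuel h1 h2
      by_cases hstop : stop ≤ a
      · rw [PySem.List.pyRange_one_eq_nil hstop,
            PySem.List.pyRange_one_eq_nil (le_trans hstop (le_max_left a nxt))]
        constructor
        · simp
        · intro j; simp only [List.foldl_nil]
          constructor
          · exact fun h => Or.inl h
          · rintro (h | ⟨hl, hr⟩)
            · exact h
            · exfalso; have := le_max_left a nxt; omega
      · rw [not_le] at hstop
        rw [PySem.List.pyRange_one_cons hstop]
        simp only [List.foldl_cons]
        by_cases hmem : a ∈ seen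
        · have hcont : PySem.Set.contains seen a = true := (PySem.Set.contains_iff seen a).mpr hmem
          rw [if_neg (by simpa using hmem)]
          have halt : a < nxt := h1 a hmem
          obtain ⟨hout, hseen⟩ := ih (a + 1) nxt seen out (by omega) h1
            (fun j hj hj2 => h2 j (by omega) hj2)
          have hmax : max (a + 1) nxt = max a nxt := by omega
          rw [hmax] at hout hseen
          exact ⟨hout, hseen⟩
        · have hcont : PySem.Set.contains seen a = false := by
            by_contra h
            exact hmem ((PySem.Set.contains_iff seen a).mp (by simpa using h))
          rw [if_pos (by simpa using hmem)]
          have hnle : nxt ≤ a := by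
            by_contra h
            exact hmem (h2 a le_rfl (by omega))
          have hmaxa : max a nxt = a := by omega
          obtain ⟨hout, hseen⟩ := ih (a + 1) (a + 1) (PySem.Set.add seen a)
            (out ++ [PySem.List.pyGetD logs a ""]) (by omega)
            (by
              intro j hj
              rcases (PySem.Set.mem_add seen a j).mp hj with h | h
              · have := h1 j h; omega
              · omega)
            (by intro j hj hj2; omega)
          constructor
          · rw [hout, hmaxa, PySem.List.pyRange_one_cons hstop]
            have : max (a + 1) (a + 1) = a + 1 := by omega
            rw [this]
            simp
          · intro j
            rw [hseen j]
            have : max (a + 1) (a + 1) = a + 1 := by omega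
            rw [this, hmaxa, PySem.Set.mem_add]
            constructor
            · rintro ((h | h) | ⟨hl, hr⟩)
              · exact Or.inl h
              · exact Or.inr ⟨by omega, by omega⟩
              · exact Or.inr ⟨by omega, hr⟩
            · rintro (h | ⟨hl, hr⟩)
              · exact Or.inl (Or.inl h)
              · by_cases hj : j = a
                · exact Or.inl (Or.inr hj)
                · exact Or.inr ⟨by omega, hr⟩

-- Main invariant: with 'nxt' = B's watermark, every seen index is < nxt and every index of
-- [max 0 (i0 - c), nxt) is seen; then the two loops emit the same lines from position i0 on.
theorem mainLoop (logs error_keywords whitelist : List String) (c : Int) :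
    ∀ (tail : List String) (i0 : Int) (seen : PySem.Set Int) (out : List String) (nxt : Int),
      (∀ j ∈ seen, j < nxt) →
      (∀ j : Int, max 0 (i0 - c) ≤ j → j < nxt → j ∈ seen) →
      (filterLoopA logs error_keywords whitelist c (PySem.List.enumerate tail i0) (seen, out)).2
        = out ++ (filterLoopB logs error_keywords whitelist c (PySem.List.enumerate tail i0) (nxt, [])).2 := by
  intro tail
  induction tail with
  | nil => intro i0 seen out nxt h1 h2; simp [PySem.List.enumerate_nil, filterLoopA, filterLoopB]
  | cons x xs ih =>
      intro i0 seen out nxt h1 h2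
      rw [PySem.List.enumerate_cons]
      simp only [filterLoopA, filterLoopB]
      have hmatch_eq : ((error_keywords.any fun keyword => PySem.Str.isIn keyword (PySem.Str.lower x)) &&
           !(whitelist.any fun phrase => PySem.Str.isIn phrase x)) = bIsMatch error_keywords whitelist x := by
        simp [bIsMatch]
      by_cases hm : bIsMatch error_keywords whitelist x = true
      · rw [hmatch_eq, if_pos hm, if_pos hm]
        set start := max 0 (i0 - c) with hstart
        set stop := min ((logs.length : Int)) (i0 + c + 1) with hstop
        have hL : max (max nxt (i0 - c)) 0 = max start nxt := by omega
        obtain ⟨hout, hseen⟩ := innerLoopA logs stop ((stop - start).toNat) start nxt seen out rfl h1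
          (fun j hj hj2 => h2 j hj hj2)
        by_cases hlt : max (max nxt (i0 - c)) 0 < stop
        · rw [if_pos hlt]
          have hlt' : max start nxt < stop := by omega
          have hstep := ih (i0 + 1)
            ((PySem.List.pyRange start stop 1).foldl
              (fun st2 j =>
                if !(PySem.Set.contains st2.1 j) then
                  (PySem.Set.add st2.1 j, st2.2 ++ [PySem.List.pyGetD logs j ""])
                else st2)
              (seen, out)).1
            ((PySem.List.pyRange start stop 1).foldl
              (fun st2 j =>
                if !(PySem.Set.contains st2.1 j) then
                  (PySem.Set.add st2.1 j, st2.2 ++ [PySem.List.pyGetD logs j ""])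
                else st2)
              (seen, out)).2
            stop
            (by
              intro j hj
              rcases (hseen j).mp hj with h | ⟨hl, hr⟩
              · have := h1 j h; omega
              · exact hr)
            (by
              intro j hj hj2
              rw [hseen j]
              by_cases hjn : j < nxt
              · exact Or.inl (h2 j (by omega) hjn)
              · exact Or.inr ⟨by omega, hj2⟩)
          rw [hstep, hout, hL,
              map_pyGetD_eq_slice logs (max start nxt) stop (by omega) hlt' (by omega)]
          simp only [List.nil_append]
          rw [filterLoopB_shift logs error_keywords whitelist c (PySem.List.enumerate xs (i0 + 1))
              stop (PySem.List.slice logs (some (max start nxt)) (some stop))]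
          simp
        · rw [if_neg hlt]
          have hempty : max start nxt ≥ stop := by omega
          have hstep := ih (i0 + 1)
            ((PySem.List.pyRange start stop 1).foldl
              (fun st2 j =>
                if !(PySem.Set.contains st2.1 j) then
                  (PySem.Set.add st2.1 j, st2.2 ++ [PySem.List.pyGetD logs j ""])
                else st2)
              (seen, out)).1
            ((PySem.List.pyRange start stop 1).foldl
              (fun st2 j =>
                if !(PySem.Set.contains st2.1 j) then
                  (PySem.Set.add st2.1 j, st2.2 ++ [PySem.List.pyGetD logs j ""])
                else st2)
              (seen, out)).2
            nxt
            (by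
              intro j hj
              rcases (hseen j).mp hj with h | ⟨hl, hr⟩
              · exact h1 j h
              · omega)
            (by
              intro j hj hj2
              rw [hseen j]
              exact Or.inl (h2 j (by omega) hj2))
          rw [hstep, hout]
          rw [PySem.List.pyRange_one_eq_nil hempty]
          simp
      · rw [hmatch_eq, if_neg hm, if_neg hm]
        exact ih (i0 + 1) seen out nxt h1 (fun j hj hj2 => h2 j (by omega) hj2)

-- ===== VERDICT (by name: the statement is the Claim_ definition above) =====
theorem filter_logs_by_keywords_spec : Claim_equal_filter_logs_by_keywords := by
  intro logs error_keywords whitelist context_lines _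
  unfold Spec_filter_logs_by_keywords filter_logs_by_keywords filter_logs_by_keywords_alt
  have h := mainLoop logs error_keywords whitelist context_lines logs 0 PySem.Set.empty [] 0
    (by intro j hj; simp [PySem.Set.empty] at hj)
    (by intro j hj hj2; omega)
  simp only at h ⊢
  rw [h]
  simp
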